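-- pv_equiv track=rewrite | github.com/samurban1/AdventureX | Framework/Skeleton/classes.py | turn_to_sentence
-- ===== SOURCE A (Python) =====
-- def turn_to_sentence(words, starting_msg, and_or, typ='misunderstood'):
--     """Print all current objects in the location."""
--     message = starting_msg
--     for i in range(len(words)):
--         # obj = OBJECTS[objects[i]]  # objects[i], for example, is 'egg'. so OBJECTS['egg']
--         if i == len(words) - 1 and len(words) > 1:  # if it's the last word to add to the list AND if there is more than one word
--             message += f' {and_or} ' if len(words) == 2 else f'{and_or} '  # add an 'and', e.g. x, y, and z -- space before 'and' based on conditional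
--         # objects_here += obj.short_description
--         if typ in ('no quotes', 'objects here'):
--             message += words[i]
--         else:
--             message += f"'{words[i]}'"
--         if len(words) > 2:
--             message += ', '
--     if typ == 'objects here':  # if printing out all the objects in a given location, then end the sentence nicely with a period.
--         message = message.strip(', ')  # strip trailing comma
--     return message
-- ===== SOURCE B (Python) =====
-- def turn_to_sentence(words, starting_msg, and_or, typ='misunderstood'):
--     """Print all current objects in the location."""
--     plain = typ in ('no quotes', 'objects here')
--     toks = [w if plain else f"'{w}'" for w in words]
--     if not toks:
--         message = starting_msg
--     elif len(toks) == 1: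
--         message = starting_msg + toks[0]
--     elif len(toks) == 2:
--         message = starting_msg + toks[0] + f' {and_or} ' + toks[1]
--     else:
--         message = starting_msg + ''.join(t + ', ' for t in toks[:-1]) + f'{and_or} ' + toks[-1] + ', '
--     if typ == 'objects here':
--         message = message.strip(', ')
--     return message
-- ===== Notes on version B (the rewrite author's own statement) =====
-- stated objective: simpler
-- what changed: A's single loop with per-index conditionals (am-I-last, spacing, quoting, trailing comma) is replaced by one pass that formats all tokens, then assembly by case on the word count (0/1/2/many), with the same final strip.
import Mathlib
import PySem

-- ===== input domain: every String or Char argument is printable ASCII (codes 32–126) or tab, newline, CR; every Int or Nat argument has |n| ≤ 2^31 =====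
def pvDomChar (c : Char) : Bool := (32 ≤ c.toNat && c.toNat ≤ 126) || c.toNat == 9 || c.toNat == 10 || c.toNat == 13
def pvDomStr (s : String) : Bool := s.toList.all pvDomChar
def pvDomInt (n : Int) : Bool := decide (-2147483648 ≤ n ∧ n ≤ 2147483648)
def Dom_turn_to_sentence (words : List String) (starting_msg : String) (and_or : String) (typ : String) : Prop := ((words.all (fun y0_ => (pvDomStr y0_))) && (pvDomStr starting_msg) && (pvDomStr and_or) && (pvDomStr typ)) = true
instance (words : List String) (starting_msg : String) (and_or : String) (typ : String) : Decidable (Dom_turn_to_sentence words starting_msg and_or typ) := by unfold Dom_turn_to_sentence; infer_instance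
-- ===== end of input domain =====

-- B replaces A's per-index loop with interleaved conditionals by a format-all-tokens pass
-- followed by assembly by case on the word count (objective: simpler); same return value.

-- ===== PORT A =====
def turn_to_sentence (words : List String) (starting_msg : String) (and_or : String) (typ : String) : String :=
  let message :=
    (PySem.List.pyRange 0 (words.length : Int) 1).foldl (fun message i =>
      let message :=
        if i = (words.length : Int) - 1 ∧ 1 < words.length then
          message ++ (if words.length = 2 then " " ++ and_or ++ " " else and_or ++ " ")
        else message
      let message :=
        if typ == "no quotes" || typ == "objects here" then
          message ++ PySem.List.pyGetD words i ""
        else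
          message ++ "'" ++ PySem.List.pyGetD words i "" ++ "'"
      if 2 < words.length then message ++ ", " else message) starting_msg
  if typ == "objects here" then PySem.Str.stripChars message ", " else message

-- ===== PORT B =====
def turn_to_sentence_alt (words : List String) (starting_msg : String) (and_or : String) (typ : String) : String :=
  let plain := typ == "no quotes" || typ == "objects here"
  let toks := words.map (fun w => if plain then w else "'" ++ w ++ "'")
  let message :=
    match toks with
    | [] => starting_msg
    | [t] => starting_msg ++ t
    | [t0, t1] => starting_msg ++ t0 ++ (" " ++ and_or ++ " ") ++ t1
    | _ :: _ :: _ :: _ =>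
        starting_msg
          ++ PySem.Str.join "" ((PySem.List.slice toks none (some (-1))).map (fun t => t ++ ", "))
          ++ (and_or ++ " ") ++ PySem.List.pyGetD toks (-1) "" ++ ", "
  if typ == "objects here" then PySem.Str.stripChars message ", " else message

-- ===== PRECONDITION & SPEC =====
def Spec_turn_to_sentence (words : List String) (starting_msg : String) (and_or : String) (typ : String) (out : String) : Prop := out = turn_to_sentence_alt words starting_msg and_or typ
instance (words : List String) (starting_msg : String) (and_or : String) (typ : String) (out : String) : Decidable (Spec_turn_to_sentence words starting_msg and_or typ out) := by unfold Spec_turn_to_sentence; infer_instance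

-- ===== CLAIM (what is proved, stated in full; the proofs are below) =====
def Claim_equal_turn_to_sentence : Prop := ∀ (words : List String) (starting_msg : String) (and_or : String) (typ : String), Dom_turn_to_sentence words starting_msg and_or typ → Spec_turn_to_sentence words starting_msg and_or typ (turn_to_sentence words starting_msg and_or typ)

-- ===== LEMMAS AND PROOFS =====

-- the common token formatter
def pvFmt (typ : String) (w : String) : String :=
  if typ == "no quotes" || typ == "objects here" then w else "'" ++ w ++ "'"

theorem pv_chars_join_nil_cons (p : List Char) (rest : List (List Char)) :
    PySem.Chars.join [] (p :: rest) = p ++ PySem.Chars.join [] rest := by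
  cases rest with
  | nil => simp [PySem.Chars.join_singleton, PySem.Chars.join_nil]
  | cons q t => rw [PySem.Chars.join_cons_cons]; simp

theorem pv_join_empty_cons (x : String) (xs : List String) :
    PySem.Str.join "" (x :: xs) = x ++ PySem.Str.join "" xs := by
  rw [← String.toList_inj]
  simp [PySem.Str.toList_join, pv_chars_join_nil_cons]

theorem pv_join_empty_nil : PySem.Str.join "" ([] : List String) = "" := by
  rw [← String.toList_inj]
  simp [PySem.Str.toList_join, PySem.Chars.join_nil]

theorem pv_foldl_str_append {α : Type} (g : α → String) (l : List α) (init : String) :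
    l.foldl (fun acc x => acc ++ g x) init = init ++ PySem.Str.join "" (l.map g) := by
  induction l generalizing init with
  | nil => simp [pv_join_empty_nil]
  | cons a l ih =>
      rw [List.map_cons, pv_join_empty_cons, List.foldl_cons, ih, String.append_assoc]

theorem pv_pyGetD_append_left {α : Type} (ys : List α) (z d : α) (i : Int)
    (h0 : 0 ≤ i) (h : i < ys.length) :
    PySem.List.pyGetD (ys ++ [z]) i d = PySem.List.pyGetD ys i d := by
  rw [PySem.List.pyGetD_eq_getElem (ys ++ [z]) d h0 (by simp; omega),
      PySem.List.pyGetD_eq_getElem ys d h0 (by simpa using h)]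
  exact List.getElem_append_left (by omega)

theorem pv_pyGetD_append_last {α : Type} (ys : List α) (z d : α) :
    PySem.List.pyGetD (ys ++ [z]) (ys.length : Int) d = z := by
  rw [PySem.List.pyGetD_eq_getElem (ys ++ [z]) d (by positivity) (by simp)]
  simp

theorem pv_strip_congr (c : Bool) (s a b : String) (h : a = b) :
    (if c then PySem.Str.stripChars a s else a) = (if c then PySem.Str.stripChars b s else b) := by
  rw [h]

theorem pv_loopA (ys : List String) (z msg ao typ : String) (hlen : 2 ≤ ys.length) :
    (PySem.List.pyRange 0 (((ys ++ [z]).length : Int)) 1).foldl (fun message i =>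
      let message :=
        if i = (((ys ++ [z]).length : Int)) - 1 ∧ 1 < (ys ++ [z]).length then
          message ++ (if (ys ++ [z]).length = 2 then " " ++ ao ++ " " else ao ++ " ")
        else message
      let message :=
        if typ == "no quotes" || typ == "objects here" then
          message ++ PySem.List.pyGetD (ys ++ [z]) i ""
        else
          message ++ "'" ++ PySem.List.pyGetD (ys ++ [z]) i "" ++ "'"
      if 2 < (ys ++ [z]).length then message ++ ", " else message) msg
    = msg ++ PySem.Str.join "" (ys.map (fun w => pvFmt typ w ++ ", "))
        ++ (ao ++ " ") ++ pvFmt typ z ++ ", " := by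
  have hL : (ys ++ [z]).length = ys.length + 1 := by simp
  have hlen1 : (((ys ++ [z]).length : Int)) = (ys.length : Int) + 1 := by simp
  rw [hlen1, PySem.List.pyRange_one_succ_right (Int.natCast_nonneg ys.length),
      List.foldl_append]
  simp only [List.foldl_cons, List.foldl_nil]
  have hstep : ∀ (acc : String), ∀ i ∈ PySem.List.pyRange 0 ((ys.length : Int)) 1,
      (fun (message : String) (i : Int) =>
        let message :=
          if i = (ys.length : Int) + 1 - 1 ∧ 1 < (ys ++ [z]).length then
            message ++ (if (ys ++ [z]).length = 2 then " " ++ ao ++ " " else ao ++ " ")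
          else message
        let message :=
          if typ == "no quotes" || typ == "objects here" then
            message ++ PySem.List.pyGetD (ys ++ [z]) i ""
          else
            message ++ "'" ++ PySem.List.pyGetD (ys ++ [z]) i "" ++ "'"
        if 2 < (ys ++ [z]).length then message ++ ", " else message) acc i
      = acc ++ (pvFmt typ (PySem.List.pyGetD ys i "") ++ ", ") := by
    intro acc i hi
    obtain ⟨h0, hlt⟩ := (PySem.List.mem_pyRange_one).mp hi
    have hne : ¬(i = (ys.length : Int) + 1 - 1 ∧ 1 < (ys ++ [z]).length) := by omega
    have h2 : 2 < (ys ++ [z]).length := by omega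
    simp only [if_neg hne, if_pos h2, pv_pyGetD_append_left ys z "" i h0 hlt]
    unfold pvFmt
    split_ifs <;> (rw [← String.toList_inj] <;> simp [String.toList_append])
  rw [PySem.List.foldl_congr_mem _ _ _ msg hstep, pv_foldl_str_append]
  rw [if_pos (show ((ys.length : Int)) = (ys.length : Int) + 1 - 1 ∧ 1 < (ys ++ [z]).length
        from ⟨by omega, by omega⟩),
      if_neg (show ¬((ys ++ [z]).length = 2) by omega),
      if_pos (show 2 < (ys ++ [z]).length by omega),
      pv_pyGetD_append_last]
  have hmap : (PySem.List.pyRange 0 ((ys.length : Int)) 1).map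
        (fun i => pvFmt typ (PySem.List.pyGetD ys i "") ++ ", ")
      = ys.map (fun w => pvFmt typ w ++ ", ") := by
    rw [show (fun i => pvFmt typ (PySem.List.pyGetD ys i "") ++ ", ")
          = (fun w => pvFmt typ w ++ ", ") ∘ (fun j => PySem.List.pyGetD ys j "") from rfl,
        ← List.map_map, PySem.List.map_pyGetD_pyRange_zero']
  rw [hmap]
  unfold pvFmt
  split_ifs <;> (rw [← String.toList_inj] <;> simp [String.toList_append])

-- ===== VERDICT (by name: the statement is the Claim_ definition above) =====
theorem turn_to_sentence_spec : Claim_equal_turn_to_sentence := by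
  intro words msg ao typ _
  unfold Spec_turn_to_sentence
  simp only [turn_to_sentence, turn_to_sentence_alt]
  apply pv_strip_congr
  rcases words with _ | ⟨w1, _ | ⟨w2, _ | ⟨w3, rest⟩⟩⟩
  · -- []
    norm_num [PySem.List.pyRange_one_eq_nil]
  · -- [w1]
    have h1 : PySem.List.pyRange 0 ((List.length [w1] : Int)) 1 = [0] := by
      rw [PySem.List.pyRange_one_cons (by norm_num), PySem.List.pyRange_one_eq_nil (by norm_num)]
    rw [h1]
    simp only [List.foldl_cons, List.foldl_nil, List.map_cons, List.map_nil]
    norm_num [PySem.List.pyGetD_zero_cons]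
    split_ifs <;> (rw [← String.toList_inj] <;> simp [String.toList_append])
  · -- [w1, w2]
    have h2 : PySem.List.pyRange 0 ((List.length [w1, w2] : Int)) 1 = [0, 1] := by
      rw [PySem.List.pyRange_one_cons (by norm_num), PySem.List.pyRange_one_cons (by norm_num),
          PySem.List.pyRange_one_eq_nil (by norm_num)]
      norm_num
    have g1 : PySem.List.pyGetD [w1, w2] 1 "" = w2 := by
      rw [PySem.List.pyGetD_eq_getElem _ _ (by norm_num) (by norm_num)]; rfl
    rw [h2]
    simp only [List.foldl_cons, List.foldl_nil, List.map_cons, List.map_nil]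
    norm_num [PySem.List.pyGetD_zero_cons, g1]
    split_ifs <;> (rw [← String.toList_inj] <;> simp [String.toList_append])
  · -- w1 :: w2 :: w3 :: rest
    obtain ⟨ys, z, hsplit, hlen⟩ :
        ∃ ys z, w1 :: w2 :: w3 :: rest = ys ++ [z] ∧ 2 ≤ ys.length := by
      rcases List.eq_nil_or_concat rest with h | ⟨rs, z, h⟩
      · exact ⟨[w1, w2], w3, by simp [h], by norm_num⟩
      · exact ⟨w1 :: w2 :: w3 :: rs, z, by simp [h], by simp⟩
    rw [show (fun w => if typ == "no quotes" || typ == "objects here" then w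
          else "'" ++ w ++ "'") = pvFmt typ from rfl]
    simp only [List.map_cons]
    have key : pvFmt typ w1 :: pvFmt typ w2 :: pvFmt typ w3 :: List.map (pvFmt typ) rest
        = List.map (pvFmt typ) ys ++ [pvFmt typ z] := by
      have h' := congrArg (List.map (pvFmt typ)) hsplit
      simpa using h'
    rw [key, PySem.List.slice_to_neg_one, List.dropLast_concat,
        PySem.List.pyGetD_neg_one_append_singleton, hsplit,
        pv_loopA ys z msg ao typ hlen]
    simp [List.map_map, Function.comp_def]
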